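-- pv_equiv track=rewrite | github.com/lucasmtvilain/taskserverImage | rechercheMatrice.py | createTableauLed
-- ===== SOURCE A (Python) =====
-- def createTableauLed(width, heigth):
--     #nbPas = 16
--
--     liste = []
--
--     for i in range (0, heigth):
--         liste.append([0] * width)
--
--     cpt = 0
--     for i in range (0, heigth):
--         for j in range (0,width):
--             liste[i][j] = cpt
--             cpt+= 1
--
--     for i in range (1, len(liste)):
--         if i%2 != 0:
--             liste[i].reverse()
--             i+=1
--
--     liste.reverse()
--     return liste
-- ===== SOURCE B (Python) =====
-- def createTableauLed(width, heigth):
--     liste = []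
--     for r in range(heigth):
--         i = heigth - 1 - r
--         if i % 2 == 0:
--             liste.append([i * width + j for j in range(width)])
--         else:
--             liste.append([i * width + (width - 1 - j) for j in range(width)])
--     return liste
-- ===== Notes on version B (the rewrite author's own statement) =====
-- stated objective: simpler
-- what changed: Computes each final row directly in one pass via the closed form base i = heigth-1-r (reversed columns when i is odd), instead of A's three passes (allocate, fill with a running counter, reverse odd rows) plus a final list reversal.
import Mathlib
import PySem

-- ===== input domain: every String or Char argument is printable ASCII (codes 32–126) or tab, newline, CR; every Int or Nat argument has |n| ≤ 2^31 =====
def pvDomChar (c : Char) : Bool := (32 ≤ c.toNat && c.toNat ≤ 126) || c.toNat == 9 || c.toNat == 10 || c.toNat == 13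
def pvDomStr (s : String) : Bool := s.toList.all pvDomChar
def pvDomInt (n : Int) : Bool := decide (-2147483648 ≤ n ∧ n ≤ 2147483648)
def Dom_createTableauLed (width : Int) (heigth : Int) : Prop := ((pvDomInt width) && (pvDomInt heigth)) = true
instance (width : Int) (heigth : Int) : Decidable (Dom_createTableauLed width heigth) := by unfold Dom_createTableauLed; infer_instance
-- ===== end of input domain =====

-- B computes each final serpentine row directly from its index in one pass (objective: simpler),
-- instead of A's allocate / counter-fill / reverse-odd-rows passes plus a final reversal.

-- ===== PORT A =====
-- literal port of A: build zero rows, fill with a running counter via in-place item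
-- assignment (List.modify/List.set; indices come from range so they are always in bounds),
-- reverse the odd-indexed rows, reverse the whole list.
def createTableauLed (width : Int) (heigth : Int) : List (List Int) :=
  let liste : List (List Int) :=
    (PySem.List.pyRange 0 heigth 1).foldl
      (fun acc _i => acc ++ [List.replicate width.toNat 0]) []
  let st : List (List Int) × Int :=
    (PySem.List.pyRange 0 heigth 1).foldl
      (fun st i =>
        (PySem.List.pyRange 0 width 1).foldl
          (fun st j => (st.1.modify i.toNat (fun row => row.set j.toNat st.2), st.2 + 1)) st)
      (liste, 0)
  let liste2 := st.1
  let liste3 :=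
    (PySem.List.pyRange 1 (liste2.length : Int) 1).foldl
      (fun acc i => if PySem.Int.mod i 2 ≠ 0 then acc.modify i.toNat (fun row => row.reverse) else acc)
      liste2
  liste3.reverse

-- ===== PORT B =====
def createTableauLed_alt (width : Int) (heigth : Int) : List (List Int) :=
  (PySem.List.pyRange 0 heigth 1).foldl
    (fun liste r =>
      let i := heigth - 1 - r
      if PySem.Int.mod i 2 = 0 then
        liste ++ [(PySem.List.pyRange 0 width 1).map (fun j => i * width + j)]
      else
        liste ++ [(PySem.List.pyRange 0 width 1).map (fun j => i * width + (width - 1 - j))])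
    []

-- ===== PRECONDITION & SPEC =====
def Spec_createTableauLed (width : Int) (heigth : Int) (out : List (List Int)) : Prop := out = createTableauLed_alt width heigth
instance (width : Int) (heigth : Int) (out : List (List Int)) : Decidable (Spec_createTableauLed width heigth out) := by unfold Spec_createTableauLed; infer_instance

-- ===== CLAIM (what is proved, stated in full; the proofs are below) =====
def Claim_equal_createTableauLed : Prop := ∀ (width : Int) (heigth : Int), Dom_createTableauLed width heigth → Spec_createTableauLed width heigth (createTableauLed width heigth)

-- ===== LEMMAS AND PROOFS =====

def pvRowF (n : Nat) (row : List Int) (c : Int) : List Int :=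
  ((List.range n).foldl (fun (p : List Int × Int) j => (p.1.set j p.2, p.2 + 1)) (row, c)).1

theorem pvFill_snd (n : Nat) (row : List Int) (c : Int) :
    ((List.range n).foldl (fun (p : List Int × Int) j => (p.1.set j p.2, p.2 + 1)) (row, c)).2 = c + n := by
  induction n with
  | zero => simp
  | succ n ih => simp [List.range_succ, List.foldl_append, ih]; ring

theorem pvRowF_succ (n : Nat) (row : List Int) (c : Int) :
    pvRowF (n + 1) row c = (pvRowF n row c).set n (c + n) := by
  have h := pvFill_snd n row c
  simp [pvRowF, List.range_succ, List.foldl_append, h]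

theorem pvSet_append_cons {α : Type} (A B : List α) (b x : α) :
    (A ++ b :: B).set A.length x = A ++ x :: B := by
  induction A with
  | nil => simp
  | cons a A ih => simp [ih]

theorem pvModify_append_cons {α : Type} (A B : List α) (b : α) (f : α → α) :
    (A ++ b :: B).modify A.length f = A ++ f b :: B := by
  induction A with
  | nil => simp
  | cons a A ih => simp [List.modify_succ_cons, ih]

theorem pvRowF_repl (n m : Nat) (c : Int) (h : n ≤ m) :
    pvRowF n (List.replicate m 0) c
      = (List.range n).map (fun (j : Nat) => c + (j : Int)) ++ List.replicate (m - n) 0 := by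
  induction n with
  | zero => simp [pvRowF]
  | succ n ih =>
    have hn : n ≤ m := by omega
    have hrep : List.replicate (m - n) (0:Int) = 0 :: List.replicate (m - (n+1)) 0 := by
      have h2 : m - n = (m - (n+1)) + 1 := by omega
      rw [h2, List.replicate_succ]
    have hset := pvSet_append_cons ((List.range n).map (fun (j : Nat) => c + (j:Int)))
      (List.replicate (m - (n+1)) (0:Int)) 0 (c + n)
    have hlen : ((List.range n).map (fun (j : Nat) => c + (j : Int))).length = n := by simp
    rw [hlen] at hset
    rw [pvRowF_succ, ih hn, hrep, hset, List.range_succ]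
    simp

theorem pvInner_modify (n : Nat) (i : Nat) : ∀ (L : List (List Int)) (c : Int),
    (List.range n).foldl
      (fun (st : List (List Int) × Int) j => (st.1.modify i (fun row => row.set j st.2), st.2 + 1)) (L, c)
    = (L.modify i (fun row => pvRowF n row c), c + n) := by
  induction n with
  | zero => intro L c; simp only [List.range_zero, List.foldl_nil]; exact Prod.ext ((List.modify_id i L).symm) (by simp)
  | succ n ih =>
    intro L c
    rw [List.range_succ, List.foldl_append, ih]
    simp only [List.foldl_cons, List.foldl_nil, List.modify_modify_eq, Prod.mk.injEq]
    refine ⟨?_, by push_cast; ring⟩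
    congr 1; funext row; rw [pvRowF_succ]; rfl

def pvRowMap (w i : Nat) : List Int :=
  (List.range w).map (fun (j : Nat) => ((i * w : Nat) : Int) + (j : Int))

theorem pvOuter_fill (w h : Nat) : ∀ n, n ≤ h →
    (List.range n).foldl
      (fun (st : List (List Int) × Int) k =>
        (List.range w).foldl
          (fun (st : List (List Int) × Int) j => (st.1.modify k (fun row => row.set j st.2), st.2 + 1)) st)
      (List.replicate h (List.replicate w (0 : Int)), 0)
    = ((List.range n).map (pvRowMap w) ++ List.replicate (h - n) (List.replicate w 0), ((n * w : Nat) : Int)) := by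
  intro n
  induction n with
  | zero => intro _; simp
  | succ n ih =>
    intro hn
    rw [List.range_succ, List.foldl_append, ih (by omega), List.foldl_cons, List.foldl_nil,
      pvInner_modify]
    have hrep : List.replicate (h - n) (List.replicate w (0:Int))
        = List.replicate w 0 :: List.replicate (h - (n+1)) (List.replicate w 0) := by
      have h2 : h - n = (h - (n+1)) + 1 := by omega
      rw [h2, List.replicate_succ]
    have hmod := pvModify_append_cons ((List.range n).map (pvRowMap w))
      (List.replicate (h - (n+1)) (List.replicate w (0:Int))) (List.replicate w 0)
      (fun row => pvRowF w row ((n*w : Nat) : Int))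
    have hlen : ((List.range n).map (pvRowMap w)).length = n := by simp
    rw [hlen] at hmod
    rw [hrep, hmod, pvRowF_repl w w _ (le_refl w)]
    refine Prod.ext ?_ (by push_cast; ring)
    simp only [List.map_append, List.map_cons, List.map_nil, Nat.sub_self,
      List.replicate_zero, List.append_nil, List.append_assoc, List.cons_append, List.nil_append]
    rfl

theorem pvFoldl_modify_getElem? {α : Type} (p : Nat → Prop) [DecidablePred p] (f : α → α) :
    ∀ (idxs : List Nat), idxs.Nodup → ∀ (R : List α) (k : Nat),
      (idxs.foldl (fun acc i => if p i then acc.modify i f else acc) R)[k]?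
        = if k ∈ idxs ∧ p k then f <$> R[k]? else R[k]? := by
  intro idxs
  induction idxs with
  | nil => intro _ R k; simp
  | cons i rest ih =>
    intro hnd R k
    have hi : i ∉ rest := (List.nodup_cons.mp hnd).1
    rw [List.foldl_cons, ih (List.nodup_cons.mp hnd).2]
    by_cases hk : k = i
    · subst hk
      have hkr : k ∉ rest := hi
      by_cases hp : p k
      · simp [hkr, hp]
      · simp [hkr, hp]
    · have h1 : (if p i then R.modify i f else R)[k]? = R[k]? := by
        split
        · simp [Ne.symm hk]
        · rfl
      rw [h1]
      by_cases hm : k ∈ rest <;> simp [hm, hk]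

theorem pvReverse_map_range {α : Type} (f : Nat → α) (n : Nat) :
    ((List.range n).map f).reverse = (List.range n).map (fun k => f (n - 1 - k)) := by
  apply List.ext_getElem (by simp)
  intro k h1 h2
  simp at h1 h2 ⊢
theorem pvB_closed (width heigth : Int) (h : Nat) (hh : heigth = (h : Int)) :
    createTableauLed_alt width heigth
      = (List.range h).map (fun r =>
          if (h - 1 - r) % 2 = 1 then (pvRowMap width.toNat (h - 1 - r)).reverse
          else pvRowMap width.toNat (h - 1 - r)) := by
  subst hh
  set w := width.toNat with hw
  unfold createTableauLed_alt
  rw [PySem.List.pyRange_one 0 (h : Int)]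
  have h0 : ((h : Int) - 0).toNat = h := by omega
  rw [h0, List.foldl_map]
  have hstep : ∀ (acc : List (List Int)), ∀ k ∈ List.range h,
      (fun (liste : List (List Int)) r =>
        if PySem.Int.mod ((h:Int) - 1 - r) 2 = 0 then
          liste ++ [(PySem.List.pyRange 0 width).map (fun j => ((h:Int) - 1 - r) * width + j)]
        else
          liste ++ [(PySem.List.pyRange 0 width).map (fun j => ((h:Int) - 1 - r) * width + (width - 1 - j))])
        acc ((0:Int) + (k:Int))
      = acc ++ [if (h - 1 - k) % 2 = 1 then (pvRowMap w (h - 1 - k)).reverse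
          else pvRowMap w (h - 1 - k)] := by
    intro acc k hk
    rw [List.mem_range] at hk
    have hik : (h:Int) - 1 - (0 + (k:Int)) = ((h - 1 - k : Nat) : Int) := by omega
    simp only [hik]
    have hmod : PySem.Int.mod ((h - 1 - k : Nat) : Int) 2 = (((h - 1 - k) % 2 : Nat) : Int) := by
      exact_mod_cast PySem.Int.mod_natCast (h - 1 - k) 2
    rw [hmod]
    rw [PySem.List.pyRange_one 0 width]
    have hw0 : (width - 0).toNat = w := by omega
    rw [hw0]
    have hrow_even :
        List.map (fun j => ((h - 1 - k : Nat) : Int) * width + j) (List.map (fun (k : Nat) => (0:Int) + (k:Int)) (List.range w))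
          = pvRowMap w (h - 1 - k) := by
      apply List.ext_getElem (by simp [pvRowMap])
      intro t h1 h2
      simp only [List.length_map, List.length_range] at h1
      simp only [List.getElem_map, List.getElem_range, pvRowMap]
      have hww : (w:Int) = width := by omega
      rw [← hww]
      push_cast
      ring
    have hrow_odd :
        List.map (fun j => ((h - 1 - k : Nat) : Int) * width + (width - 1 - j)) (List.map (fun (k : Nat) => (0:Int) + (k:Int)) (List.range w))
          = (pvRowMap w (h - 1 - k)).reverse := by
      apply List.ext_getElem (by simp [pvRowMap])
      intro t h1 h2
      simp only [List.length_map, List.length_range] at h1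
      rw [List.getElem_reverse]
      simp only [List.getElem_map, List.getElem_range, pvRowMap, List.length_map, List.length_range]
      have hww : (w:Int) = width := by omega
      have hc : ((w - 1 - t : Nat) : Int) = (w : Int) - 1 - (t : Int) := by omega
      rw [← hww, hc]
      push_cast
      ring
    by_cases hpar : (h - 1 - k) % 2 = 1
    · have hne : (((h - 1 - k) % 2 : Nat) : Int) ≠ 0 := by omega
      rw [if_neg hne, if_pos hpar, hrow_odd]
    · have heq : (((h - 1 - k) % 2 : Nat) : Int) = 0 := by omega
      rw [if_pos heq, if_neg hpar, hrow_even]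
  rw [PySem.List.foldl_congr_mem _ _ _ _ hstep]
  rw [PySem.List.foldl_append_singleton_eq_map]
  simp

theorem pvA_closed (width heigth : Int) (h : Nat) (hh : heigth = (h : Int)) :
    createTableauLed width heigth
      = ((List.range h).map (fun i =>
          if i % 2 = 1 then (pvRowMap width.toNat i).reverse else pvRowMap width.toNat i)).reverse := by
  subst hh
  set w := width.toNat with hw
  unfold createTableauLed
  dsimp only
  rw [PySem.List.foldl_append_singleton_eq_map (fun _i : Int => List.replicate w (0:Int))]
  rw [List.nil_append, List.map_const', PySem.List.length_pyRange_one]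
  have h0 : ((h:Int) - 0).toNat = h := by omega
  rw [h0]
  rw [PySem.List.pyRange_one 0 (h:Int), h0, List.foldl_map]
  simp only [PySem.List.pyRange_one 0 width, List.foldl_map, zero_add, Int.toNat_natCast]
  have hw0 : (width - 0).toNat = w := by omega
  rw [hw0]
  rw [pvOuter_fill w h h (le_refl h)]
  simp only [Nat.sub_self, List.replicate_zero, List.append_nil, List.length_map, List.length_range]
  rw [PySem.List.pyRange_one 1 (h:Int), List.foldl_map]
  congr 1
  have hstep : ∀ (acc : List (List Int)), ∀ k ∈ List.range (((h:Int) - 1).toNat),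
      (fun (acc : List (List Int)) (i : Int) =>
        if PySem.Int.mod i 2 ≠ 0 then acc.modify i.toNat (fun row => row.reverse) else acc) acc ((1:Int) + (k:Int))
      = (fun (acc : List (List Int)) (i : Nat) =>
          if i % 2 = 1 then acc.modify i (fun row => row.reverse) else acc) acc (k + 1) := by
    intro acc k _
    have h1k : (1:Int) + (k:Int) = ((k+1 : Nat) : Int) := by push_cast; ring
    have hmod : PySem.Int.mod ((k+1 : Nat) : Int) 2 = (((k+1) % 2 : Nat) : Int) := by
      exact_mod_cast PySem.Int.mod_natCast (k+1) 2
    simp only [h1k, hmod, Int.toNat_natCast]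
    by_cases hpar : (k+1) % 2 = 1
    · rw [if_pos (by exact_mod_cast by omega), if_pos hpar]
    · rw [if_neg (by exact_mod_cast by omega), if_neg hpar]
  rw [PySem.List.foldl_congr_mem _ _ _ _ hstep]
  rw [show (fun (acc : List (List Int)) (k : Nat) =>
        (fun (acc : List (List Int)) (i : Nat) =>
          if i % 2 = 1 then acc.modify i (fun row => row.reverse) else acc) acc (k + 1))
      = (fun (acc : List (List Int)) (k : Nat) =>
          (fun (acc : List (List Int)) (i : Nat) =>
            if i % 2 = 1 then acc.modify i (fun row => row.reverse) else acc) acc ((fun n : Nat => n + 1) k)) from rfl]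
  have hfm := List.foldl_map (f := fun n : Nat => n + 1)
    (g := fun (acc : List (List Int)) (i : Nat) => if i % 2 = 1 then acc.modify i (fun row => row.reverse) else acc)
    (l := List.range (((h:Int) - 1).toNat)) (init := List.map (pvRowMap w) (List.range h))
  rw [← hfm]
  have hnd : ((List.range (((h:Int) - 1).toNat)).map (fun n : Nat => n + 1)).Nodup :=
    (List.nodup_range).map (fun a b => by omega)
  apply List.ext_getElem?
  intro t
  rw [pvFoldl_modify_getElem? (α := List Int) (fun i => i % 2 = 1) (fun row => row.reverse) _ hnd]
  have hmem : t ∈ (List.range (((h:Int) - 1).toNat)).map (fun n : Nat => n + 1) ↔ 1 ≤ t ∧ t < h := by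
    simp [List.mem_map, List.mem_range]
    constructor
    · rintro ⟨a, ha, rfl⟩; omega
    · rintro ⟨h1, h2⟩; exact ⟨t - 1, by omega, by omega⟩
  by_cases ht : t < h
  · have hM : (List.map (pvRowMap w) (List.range h))[t]? = some (pvRowMap w t) := by
      simp [ht]
    have hR : (List.map (fun i => if i % 2 = 1 then (pvRowMap w i).reverse else pvRowMap w i) (List.range h))[t]?
        = some (if t % 2 = 1 then (pvRowMap w t).reverse else pvRowMap w t) := by
      simp [ht]
    rw [hM, hR]
    by_cases hpar : t % 2 = 1
    · rw [if_pos ⟨hmem.mpr ⟨by omega, ht⟩, hpar⟩]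
      simp [hpar]
    · rw [if_neg (by tauto)]
      simp [hpar]
  · have hM : (List.map (pvRowMap w) (List.range h))[t]? = none := by
      simp; omega
    have hR : (List.map (fun i => if i % 2 = 1 then (pvRowMap w i).reverse else pvRowMap w i) (List.range h))[t]? = none := by
      simp; omega
    rw [hM, hR]
    split <;> rfl

-- ===== VERDICT (by name: the statement is the Claim_ definition above) =====
theorem createTableauLed_spec : Claim_equal_createTableauLed := by
  intro width heigth _
  unfold Spec_createTableauLed
  by_cases hpos : 0 ≤ heigth
  · have hh : heigth = (heigth.toNat : Int) := by omega
    rw [pvA_closed width heigth heigth.toNat hh, pvB_closed width heigth heigth.toNat hh,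
      pvReverse_map_range]
  · have e1 : PySem.List.pyRange 0 heigth = [] := PySem.List.pyRange_one_eq_nil (by omega)
    have e2 : PySem.List.pyRange 1 (0:Int) = [] := PySem.List.pyRange_one_eq_nil (by omega)
    simp [createTableauLed, createTableauLed_alt, e1, e2]
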